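-- pv_equiv track=rewrite | github.com/kyrolyte/pyfiles | py/chss/file_fmt_chsmae_fmweight.py | find_front_matter
-- ===== SOURCE A (Python) =====
-- def find_front_matter(lines):
--     """
--     Return a tuple (start_idx, end_idx) of the indices of the opening
--     and closing `---` lines that delimit the front‑matter block.
--     If no front‑matter is found, return (None, None).
--     """
--     # Search for the opening marker at the very first line
--     if not lines:
--         return None, None
--     if not lines[0].strip() == "---":
--         return None, None
--
--     # Look for the next `---` line after the first one
--     for i in range(1, len(lines)):
--         if lines[i].strip() == "---":
--             return 0, i
--     return None, None
-- ===== SOURCE B (Python) =====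
-- def find_front_matter(lines):
--     """
--     Return a tuple (start_idx, end_idx) of the indices of the opening
--     and closing `---` lines that delimit the front-matter block.
--     If no front-matter is found, return (None, None).
--     """
--     markers = [i for i, l in enumerate(lines) if l.strip() == "---"]
--     if markers and markers[0] == 0 and len(markers) >= 2:
--         return 0, markers[1]
--     return None, None
-- ===== Notes on version B (the rewrite author's own statement) =====
-- stated objective: alternative
-- what changed: Replaces the guard-plus-early-return scan with one pass that builds the full table of '---' marker positions and then decides by inspecting the first two entries of that table.
import Mathlib
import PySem

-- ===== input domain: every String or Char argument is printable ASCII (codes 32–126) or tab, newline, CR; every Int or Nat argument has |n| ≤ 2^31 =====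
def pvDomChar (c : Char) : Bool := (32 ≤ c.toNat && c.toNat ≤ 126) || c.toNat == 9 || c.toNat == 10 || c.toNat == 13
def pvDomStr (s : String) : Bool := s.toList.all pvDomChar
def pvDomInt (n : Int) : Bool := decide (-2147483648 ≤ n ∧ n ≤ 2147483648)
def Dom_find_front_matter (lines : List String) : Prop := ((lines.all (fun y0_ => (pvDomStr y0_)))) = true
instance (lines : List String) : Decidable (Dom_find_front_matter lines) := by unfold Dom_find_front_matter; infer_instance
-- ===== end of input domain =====

-- B builds the full table of '---' marker positions in one pass and decides from its first two entries,
-- instead of A's guard on line 0 plus an early-return scan; alternative decomposition, same cost.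


-- ===== PORT A =====
-- the `for i in range(1, len(lines))` loop with early return: walk the tail carrying the index
def ffm_scan : List String → Int → Option Int × Option Int
  | [], _ => (none, none)
  | l :: rest, i =>
    if PySem.Str.strip l = "---" then (some 0, some i) else ffm_scan rest (i + 1)

def find_front_matter (lines : List String) : Option Int × Option Int :=
  match lines with
  | [] => (none, none)
  | l0 :: rest =>
    if ¬ (PySem.Str.strip l0 = "---") then (none, none)
    else ffm_scan rest 1

-- ===== PORT B =====
-- markers = [i for i, l in enumerate(lines) if l.strip() == "---"]
def ffm_markers (xs : List String) (s : Int) : List Int :=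
  (PySem.List.enumerate xs s).filterMap
    (fun p => if PySem.Str.strip p.2 = "---" then some p.1 else none)

def find_front_matter_alt (lines : List String) : Option Int × Option Int :=
  match ffm_markers lines 0 with
  | m0 :: m1 :: _ => if m0 = 0 then (some 0, some m1) else (none, none)
  | _ => (none, none)

-- ===== PRECONDITION & SPEC =====
def Spec_find_front_matter (lines : List String) (out : Option Int × Option Int) : Prop := out = find_front_matter_alt lines
instance (lines : List String) (out : Option Int × Option Int) : Decidable (Spec_find_front_matter lines out) := by unfold Spec_find_front_matter; infer_instance

-- ===== CLAIM (what is proved, stated in full; the proofs are below) =====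
def Claim_equal_find_front_matter : Prop := ∀ (lines : List String), Dom_find_front_matter lines → Spec_find_front_matter lines (find_front_matter lines)

-- ===== LEMMAS AND PROOFS =====
theorem ffm_markers_cons (x : String) (xs : List String) (s : Int) :
    ffm_markers (x :: xs) s =
      (if PySem.Str.strip x = "---" then [s] else []) ++ ffm_markers xs (s + 1) := by
  simp only [ffm_markers, PySem.List.enumerate_cons, List.filterMap_cons]
  split_ifs with h <;> simp

theorem ffm_markers_ge (xs : List String) (s : Int) :
    ∀ m ∈ ffm_markers xs s, s ≤ m := by
  induction xs generalizing s with
  | nil => simp [ffm_markers]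
  | cons x xs ih =>
    intro m hm
    rw [ffm_markers_cons] at hm
    rcases List.mem_append.1 hm with h | h
    · split_ifs at h <;> simp at h; omega
    · have := ih (s + 1) m h; omega

theorem ffm_scan_eq (xs : List String) (s : Int) :
    ffm_scan xs s =
      (match ffm_markers xs s with
       | m :: _ => (some 0, some m)
       | [] => (none, none)) := by
  induction xs generalizing s with
  | nil => simp [ffm_scan, ffm_markers]
  | cons x xs ih =>
    rw [ffm_markers_cons]
    by_cases h : PySem.Str.strip x = "---" <;>
      simp [ffm_scan, h, ih]

-- ===== VERDICT (by name: the statement is the Claim_ definition above) =====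
theorem find_front_matter_spec : Claim_equal_find_front_matter := by
  intro lines _
  unfold Spec_find_front_matter
  match lines with
  | [] => rfl
  | l0 :: rest =>
    unfold find_front_matter find_front_matter_alt
    dsimp only
    rw [ffm_markers_cons, zero_add]
    by_cases h : PySem.Str.strip l0 = "---"
    · rw [if_neg (not_not_intro h), ffm_scan_eq]
      simp only [h, if_true, List.singleton_append]
      cases hm : ffm_markers rest 1 with
      | nil => rfl
      | cons m1 ms => simp
    · rw [if_pos h]
      simp only [h, if_false, List.nil_append]
      cases hm : ffm_markers rest 1 with
      | nil => rfl
      | cons m1 ms =>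
        cases ms with
        | nil => rfl
        | cons m2 t =>
          have hge := ffm_markers_ge rest 1
          have h1 : (1 : Int) ≤ m1 := hge m1 (by rw [hm]; simp)
          dsimp only
          rw [if_neg (by omega : ¬ m1 = 0)]
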